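-- pv_equiv track=rewrite | github.com/Marc-projects/Ma513_IPSA | predict_multi_bert.py | mean_multi_prediction_finale
-- ===== SOURCE A (Python) =====
-- def val_freq_high(liste):
--     compteur={}
--     for i in liste:
--         if i in compteur.keys():
--             compteur[i] += 1
--         else:
--             compteur[i] = 1
--     high = max(compteur, key=compteur.get)  # retourne la clé avec la plus grande valeur
--     return high
--
-- def mean_multi_prediction_finale(multi_pred):
--     pred_croise = []
--     for i in range(len(multi_pred[0])):
--         label = []
--         for j in range(len(multi_pred[0][i])):
--             label.append([multi_pred[0][i][j]])
--         pred_croise.append(label)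
--     for n in range(1, len(multi_pred)):
--         for i in range(len(multi_pred[n])):
--             for j in range(len(multi_pred[n][i])):
--                 pred_croise[i][j].append(multi_pred[n][i][j])
--     for i in range(len(pred_croise)):
--         for j in range(len(pred_croise[i])):
--             pred_croise[i][j] = val_freq_high(pred_croise[i][j])    # récupération de la prédiction avec le plus de fréquence
--     return pred_croise
-- ===== SOURCE B (Python) =====
-- def mean_multi_prediction_finale(multi_pred):
--     # Same majority vote, but no intermediate transposed buffer: gather the
--     # votes of every model for each cell directly and pick the mode by a
--     # count scan (first value reaching the maximal count wins, as in A).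
--     return [
--         [_mode([m[i][j] for m in multi_pred]) for j in range(len(multi_pred[0][i]))]
--         for i in range(len(multi_pred[0]))
--     ]
--
-- def _mode(votes):
--     best = votes[0]
--     for v in votes:
--         if votes.count(v) > votes.count(best):
--             best = v
--     return best
-- ===== Notes on version B (the rewrite author's own statement) =====
-- stated objective: simpler
-- what changed: B drops A's three-pass build-transpose/append/reduce buffer and its counting dict: it gathers each cell's votes [m[i][j] for m in multi_pred] directly and picks the mode by a first-strict-greater count scan in two nested comprehensions; Pre_ excludes the empty list (A raises IndexError) and ragged inputs whose prediction sets do not all have the shape of the first one, where A either raises or silently drops votes of shorter models.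
-- outside the precondition, e.g. on mean_multi_prediction_finale([[[1, 2]], [[3]]]): A returns [[1, 2]], B raises IndexError
import Mathlib
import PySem

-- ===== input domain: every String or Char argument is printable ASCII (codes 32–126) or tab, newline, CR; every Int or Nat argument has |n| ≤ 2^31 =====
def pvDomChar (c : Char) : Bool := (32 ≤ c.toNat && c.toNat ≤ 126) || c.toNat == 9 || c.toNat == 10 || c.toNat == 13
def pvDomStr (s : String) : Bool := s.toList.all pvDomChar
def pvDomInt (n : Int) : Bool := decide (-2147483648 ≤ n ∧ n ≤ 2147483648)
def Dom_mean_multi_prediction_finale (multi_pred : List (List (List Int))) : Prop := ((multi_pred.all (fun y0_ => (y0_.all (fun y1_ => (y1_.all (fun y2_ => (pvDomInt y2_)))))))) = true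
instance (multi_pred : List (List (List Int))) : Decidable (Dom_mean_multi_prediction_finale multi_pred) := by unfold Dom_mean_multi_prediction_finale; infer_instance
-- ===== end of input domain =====

-- B replaces A's three-pass transpose-buffer-and-dict majority vote by a direct per-cell
-- gather of the votes and a count-scan mode (simpler decomposition, same results).


-- ===== PORT A =====
-- helper of A: counting dict, then max(compteur, key=compteur.get);
-- max() of an empty dict raises ValueError in Python — the `none` branch (dummy 0) is
-- unreachable: every cell list A feeds it is nonempty.
def val_freq_high (liste : List Int) : Int :=
  let compteur := liste.foldl
    (fun d i => if d.contains i then d.insert i (d.getD i 0 + 1) else d.insert i 1)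
    (PySem.Dict.empty : PySem.Dict Int Int)
  match PySem.List.max? compteur.keys (fun k => compteur.getD k 0) with
  | some high => high
  | none => 0

-- multi_pred[0] raises IndexError on [] (excluded by Pre_); inside Pre_ every index the
-- loops produce is in range, so the headD/getD defaults are never the result.
def mean_multi_prediction_finale (multi_pred : List (List (List Int))) : List (List Int) :=
  let m0 := multi_pred.headD []
  let pred0 : List (List (List Int)) :=
    (List.range m0.length).foldl (fun acc i =>
      acc ++ [(List.range (m0.getD i []).length).foldl
                (fun label j => label ++ [[(m0.getD i []).getD j 0]]) []]) []
  let pc :=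
    (List.range' 1 (multi_pred.length - 1)).foldl (fun pc n =>
      (List.range (multi_pred.getD n []).length).foldl (fun pc i =>
        (List.range ((multi_pred.getD n []).getD i []).length).foldl (fun pc j =>
          pc.set i ((pc.getD i []).set j
            ((pc.getD i []).getD j []
              ++ [((multi_pred.getD n []).getD i []).getD j 0]))) pc) pc) pred0
  pc.map (fun row => row.map val_freq_high)

-- ===== PORT B =====
-- helper of B: first value whose count strictly beats the running best wins.
def pv_mode (votes : List Int) : Int :=
  votes.foldl (fun best v => if votes.count best < votes.count v then v else best)
    (votes.headD 0)

def mean_multi_prediction_finale_alt (multi_pred : List (List (List Int))) : List (List Int) :=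
  let m0 := multi_pred.headD []
  (List.range m0.length).map (fun i =>
    (List.range (m0.getD i []).length).map (fun j =>
      pv_mode (multi_pred.map (fun m => (m.getD i []).getD j 0))))

-- ===== PRECONDITION & SPEC =====
-- Pre_ excludes the empty list (A raises IndexError) and ragged inputs whose prediction
-- sets do not all have the shape of the first one: there A either raises IndexError or
-- silently drops the votes of the shorter models — outside the task's natural domain
-- (all models predict the same dataset).
def Pre_mean_multi_prediction_finale (multi_pred : List (List (List Int))) : Prop :=
  multi_pred ≠ [] ∧
    ∀ m ∈ multi_pred, m.map List.length = (multi_pred.headD []).map List.length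
instance (multi_pred : List (List (List Int))) : Decidable (Pre_mean_multi_prediction_finale multi_pred) := by unfold Pre_mean_multi_prediction_finale; infer_instance

def pvWitness_mean_multi_prediction_finale : List (List (List Int)) :=
  [[[1, 2], [3]], [[1, 5], [3]], [[4, 2], [0]]]

def Spec_mean_multi_prediction_finale (multi_pred : List (List (List Int))) (out : List (List Int)) : Prop := out = mean_multi_prediction_finale_alt multi_pred
instance (multi_pred : List (List (List Int))) (out : List (List Int)) : Decidable (Spec_mean_multi_prediction_finale multi_pred out) := by unfold Spec_mean_multi_prediction_finale; infer_instance

-- ===== CLAIM (what is proved, stated in full; the proofs are below) =====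
def Claim_equal_mean_multi_prediction_finale : Prop := ∀ (multi_pred : List (List (List Int))), Dom_mean_multi_prediction_finale multi_pred → Pre_mean_multi_prediction_finale multi_pred → Spec_mean_multi_prediction_finale multi_pred (mean_multi_prediction_finale multi_pred)

-- ===== LEMMAS AND PROOFS =====

-- ---------- generic fold shapes ----------

-- a range' fold reading l.getD is a fold over the corresponding suffix of l
theorem foldl_range'_getD {α β : Type} (l : List α) (d : α) (g : β → α → β) :
    ∀ k n (init : β), k = l.length - n →
      (List.range' n k).foldl (fun acc i => g acc (l.getD i d)) init
        = (l.drop n).foldl g init := by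
  intro k
  induction k with
  | zero =>
    intro n init h
    have : l.length ≤ n := by omega
    simp [List.drop_eq_nil_of_le this]
  | succ k ih =>
    intro n init h
    have hn : n < l.length := by omega
    rw [List.range'_succ, List.drop_eq_getElem_cons hn]
    simp only [List.foldl_cons]
    rw [List.getD_eq_getElem l d hn]
    exact ih (n + 1) _ (by omega)

-- a fold whose every step only rewrites index i is a single set at i
theorem foldl_set_single {α : Type} (i : Nat) (F : Nat → α → α) :
    ∀ (js : List Nat) (pc : List α) (d : α), i < pc.length →
      js.foldl (fun pc j => pc.set i (F j (pc.getD i d))) pc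
        = pc.set i (js.foldl (fun r j => F j r) (pc.getD i d)) := by
  intro js
  induction js with
  | nil =>
    intro pc d hi
    simp only [List.foldl_nil, List.getD, List.getElem?_eq_getElem hi, Option.getD_some,
      List.set_getElem_self]
  | cons j js ih =>
    intro pc d hi
    simp only [List.foldl_cons]
    rw [ih _ d (by simpa using hi)]
    rw [List.set_set]
    congr 1
    congr 1
    have hi' : i < (pc.set i (F j (pc.getD i d))).length := by simpa using hi
    rw [List.getD_eq_getElem _ d hi', List.getElem_set_self (by simpa using hi)]

theorem foldl_set_shift {α : Type} (h : Nat → α → α) (d : α) :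
    ∀ (js : List Nat) (c : α) (t : List α),
      js.foldl (fun r j => r.set (j + 1) (h j (r.getD (j + 1) d))) (c :: t)
        = c :: js.foldl (fun r j => r.set j (h j (r.getD j d))) t := by
  intro js
  induction js with
  | nil => intro c t; rfl
  | cons j js ih =>
    intro c t
    simp only [List.foldl_cons, List.set_cons_succ, List.getD_cons_succ]
    exact ih c _

-- setting every index once, reading the not-yet-set value, is mapIdx
theorem foldl_set_range {α : Type} (g : Nat → α → α) (d : α) :
    ∀ (r0 : List α),
      (List.range r0.length).foldl (fun r j => r.set j (g j (r.getD j d))) r0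
        = r0.mapIdx (fun j a => g j a) := by
  suffices h : ∀ (r0 : List α) (g : Nat → α → α),
      (List.range r0.length).foldl (fun r j => r.set j (g j (r.getD j d))) r0
        = r0.mapIdx (fun j a => g j a) from fun r0 => h r0 g
  intro r0
  induction r0 with
  | nil => intro g; rfl
  | cons a t ih =>
    intro g
    rw [List.length_cons, List.range_succ_eq_map, List.foldl_cons, List.foldl_map]
    simp only [List.set_cons_zero, List.getD_cons_zero]
    rw [foldl_set_shift (fun j r => g (j + 1) r) d (List.range t.length) (g 0 a) t]
    rw [ih (fun j r => g (j + 1) r)]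
    simp [List.mapIdx_cons]

-- ---------- the vote matrix ----------

-- cell (i, j) of the matrix holds every processed model's prediction, in model order
def pvV (s : List Nat) (done : List (List (List Int))) : List (List (List Int)) :=
  (List.range s.length).map (fun i =>
    (List.range (s.getD i 0)).map (fun j =>
      done.map (fun m => (m.getD i []).getD j 0)))

-- one iteration of A's second pass (one model folded into the buffer)
def pvStep (pc : List (List (List Int))) (mn : List (List Int)) : List (List (List Int)) :=
  (List.range mn.length).foldl (fun pc i =>
    (List.range ((mn.getD i []).length)).foldl (fun pc j =>
      pc.set i ((pc.getD i []).set j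
        ((pc.getD i []).getD j [] ++ [(mn.getD i []).getD j 0]))) pc) pc

theorem pvStep_inner (mn : List (List Int)) (pc : List (List (List Int))) (i : Nat)
    (hi : i < pc.length) (hlen : (mn.getD i []).length = (pc.getD i []).length) :
    (List.range ((mn.getD i []).length)).foldl (fun pc j =>
        pc.set i ((pc.getD i []).set j
          ((pc.getD i []).getD j [] ++ [(mn.getD i []).getD j 0]))) pc
      = pc.set i ((pc.getD i []).mapIdx
          (fun j c => c ++ [(mn.getD i []).getD j 0])) := by
  rw [foldl_set_single i
    (fun j r => r.set j (r.getD j [] ++ [(mn.getD i []).getD j 0])) _ pc [] hi]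
  rw [hlen, foldl_set_range (fun j c => c ++ [(mn.getD i []).getD j 0]) []]

theorem pvStep_eq (mn : List (List Int)) :
    ∀ (is : List Nat) (pc : List (List (List Int))),
      (∀ i ∈ is, i < pc.length ∧ (mn.getD i []).length = (pc.getD i []).length) →
      is.foldl (fun pc i =>
          (List.range ((mn.getD i []).length)).foldl (fun pc j =>
            pc.set i ((pc.getD i []).set j
              ((pc.getD i []).getD j [] ++ [(mn.getD i []).getD j 0]))) pc) pc
        = is.foldl (fun pc i =>
            pc.set i ((pc.getD i []).mapIdx
              (fun j c => c ++ [(mn.getD i []).getD j 0]))) pc := by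
  intro is
  induction is with
  | nil => intro pc h; rfl
  | cons i is ih =>
    intro pc h
    obtain ⟨hi, hlen⟩ := h i (by simp)
    simp only [List.foldl_cons]
    rw [pvStep_inner mn pc i hi hlen]
    apply ih
    intro i' hi'
    obtain ⟨h1, h2⟩ := h i' (by simp [hi'])
    constructor
    · simpa using h1
    · by_cases hii : i' = i
      · subst hii
        have : (pc.set i' ((pc.getD i' []).mapIdx
            (fun j c => c ++ [(mn.getD i' []).getD j 0]))).getD i' []
            = (pc.getD i' []).mapIdx (fun j c => c ++ [(mn.getD i' []).getD j 0]) := by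
          rw [List.getD_eq_getElem _ _ (by simpa using hi),
            List.getElem_set_self (by simpa using hi)]
        rw [this, List.length_mapIdx]
        exact h2
      · have : (pc.set i ((pc.getD i []).mapIdx
            (fun j c => c ++ [(mn.getD i []).getD j 0]))).getD i' []
            = pc.getD i' [] := by
          by_cases hlt : i' < pc.length
          · rw [List.getD_eq_getElem _ _ (by simpa using hlt),
              List.getElem_set_ne (by omega), ← List.getD_eq_getElem _ _ hlt]
          · rw [List.getD_eq_default _ _ (by simpa using not_lt.mp hlt),
              List.getD_eq_default _ _ (by simpa using not_lt.mp hlt)]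
        rw [this]
        exact h2

theorem pvStep_V (s : List Nat) (done : List (List (List Int))) (mn : List (List Int))
    (hs : mn.map List.length = s) :
    pvStep (pvV s done) mn = pvV s (done ++ [mn]) := by
  have hlen : mn.length = s.length := by rw [← hs, List.length_map]
  have hVlen : (pvV s done).length = s.length := by simp [pvV]
  have hmn : ∀ i, (mn.getD i []).length = s.getD i 0 := by
    intro i
    rw [← hs]
    by_cases hi : i < mn.length
    · rw [List.getD_eq_getElem _ _ hi, List.getD_eq_getElem _ _ (by simpa using hi),
        List.getElem_map]
    · rw [List.getD_eq_default _ _ (by simpa using not_lt.mp hi),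
        List.getD_eq_default _ _ (by simpa using not_lt.mp hi)]
      rfl
  have hrow : ∀ i, i < s.length → (pvV s done).getD i []
      = (List.range (s.getD i 0)).map (fun j => done.map (fun m => (m.getD i []).getD j 0)) := by
    intro i hi
    rw [List.getD_eq_getElem _ _ (by simpa [pvV] using hi)]
    simp [pvV]
  unfold pvStep
  rw [pvStep_eq mn (List.range mn.length) (pvV s done) (by
    intro i hi
    have hi' : i < s.length := by rw [← hlen]; simpa using hi
    refine ⟨by rw [hVlen]; exact hi', ?_⟩
    rw [hmn i, hrow i hi']
    simp)]
  rw [show List.range mn.length = List.range (pvV s done).length by rw [hVlen, hlen]]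
  rw [foldl_set_range (fun i row => row.mapIdx (fun j c => c ++ [(mn.getD i []).getD j 0])) []]
  apply List.ext_getElem
  · simp [pvV]
  · intro i h1 h2
    rw [List.getElem_mapIdx]
    simp only [pvV, List.getElem_map, List.getElem_range]
    apply List.ext_getElem
    · simp
    · intro j hj1 hj2
      simp [List.getElem_mapIdx, List.map_append]

theorem pv_models (s : List Nat) :
    ∀ (t done : List (List (List Int))),
      (∀ m ∈ t, m.map List.length = s) →
      t.foldl pvStep (pvV s done) = pvV s (done ++ t) := by
  intro t
  induction t with
  | nil => intro done h; simp
  | cons mn t ih =>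
    intro done h
    simp only [List.foldl_cons]
    rw [pvStep_V s done mn (h mn (by simp))]
    rw [ih (done ++ [mn]) (fun m hm => h m (by simp [hm]))]
    simp

-- ---------- the mode: A's dict-and-max equals B's count scan ----------

-- Set.update only appends
theorem prefix_set_update {α : Type} [BEq α] :
    ∀ (xs : List α) (s : PySem.Set α), s <+: PySem.Set.update s xs := by
  intro xs
  induction xs with
  | nil => intro s; exact List.prefix_refl s
  | cons x xs ih =>
    intro s
    refine List.IsPrefix.trans ?_ (ih (PySem.Set.add s x))
    unfold PySem.Set.add
    split
    · exact List.prefix_refl s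
    · exact List.prefix_append s [x]

-- scanning with duplicates equals scanning the first occurrences, given that every
-- already-seen value is already beaten by the accumulator
theorem foldl_mode_dedup (cnt : Int → Nat) :
    ∀ (xs : List Int) (s : PySem.Set Int) (b : Int),
      (∀ y ∈ s, cnt y ≤ cnt b) →
      xs.foldl (fun b v => if cnt b < cnt v then v else b) b
        = ((PySem.Set.update s xs).drop s.length).foldl
            (fun b v => if cnt b < cnt v then v else b) b := by
  intro xs
  induction xs with
  | nil =>
    intro s b hb
    simp [PySem.Set.update, List.drop_length]
  | cons x xs ih =>
    intro s b hb
    have hupd : PySem.Set.update s (x :: xs) = PySem.Set.update (PySem.Set.add s x) xs := rfl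
    by_cases hx : PySem.Set.contains s x
    · have hxs : x ∈ s := by simpa [PySem.Set.contains] using hx
      have hadd : PySem.Set.add s x = s := by simp [PySem.Set.add, hxs]
      have hstep : (if cnt b < cnt x then x else b) = b := by
        rw [if_neg]; exact not_lt.mpr (hb x hxs)
      simp only [List.foldl_cons, hstep, hupd, hadd]
      exact ih s b hb
    · have hxs : x ∉ s := by simpa [PySem.Set.contains] using hx
      have hadd : PySem.Set.add s x = s ++ [x] := by simp [PySem.Set.add, hxs]
      set b' := if cnt b < cnt x then x else b with hb'
      have hbb' : cnt b ≤ cnt b' := by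
        rw [hb']; split
        · exact le_of_lt (by assumption)
        · exact le_refl _
      have hb'' : ∀ y ∈ s ++ [x], cnt y ≤ cnt b' := by
        intro y hy
        rcases List.mem_append.mp hy with h | h
        · exact le_trans (hb y h) hbb'
        · have : y = x := by simpa using h
          subst this
          rw [hb']; split
          · exact le_refl _
          · exact not_lt.mp (by assumption)
      obtain ⟨rest, hrest⟩ := prefix_set_update xs (s ++ [x])
      have h1 : PySem.Set.update s (x :: xs) = s ++ x :: rest := by
        rw [hupd, hadd, ← hrest]; simp
      have hdrop : (PySem.Set.update s (x :: xs)).drop s.length = x :: rest := by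
        rw [h1]; simp
      have hdrop' : (PySem.Set.update (s ++ [x]) xs).drop (s ++ [x]).length = rest := by
        rw [← hrest]; simp
      rw [hdrop]
      simp only [List.foldl_cons, ← hb']
      rw [ih (s ++ [x]) b' hb'', hdrop']

-- max? on a cons list is the plain first-max fold
theorem max?_cons_eq_foldl {κ : Type} [LT κ] [DecidableLT κ] (key : Int → κ) :
    ∀ (t : List Int) (x : Int),
      PySem.List.max? (x :: t) key
        = some (t.foldl (fun m y => if key m < key y then y else m) x) := by
  intro t
  induction t with
  | nil => intro x; rfl
  | cons y t ih =>
    intro x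
    have h1 : PySem.List.max? (x :: y :: t) key
        = PySem.List.max? ((if key x < key y then y else x) :: t) key := by
      by_cases h : key x < key y <;> simp [PySem.List.max?, h]
    rw [h1, ih]
    simp only [List.foldl_cons]

theorem val_freq_high_eq_pv_mode : ∀ (vs : List Int), vs ≠ [] → val_freq_high vs = pv_mode vs := by
  intro vs hvs
  obtain ⟨x, t, rfl⟩ := List.exists_cons_of_ne_nil hvs
  have hctr : (x :: t).foldl
      (fun d i => if d.contains i then d.insert i (d.getD i 0 + 1) else d.insert i 1)
      (PySem.Dict.empty : PySem.Dict Int Int) = PySem.Dict.counter (x :: t) := by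
    have hfn : (fun (d : PySem.Dict Int Int) i =>
        if d.contains i then d.insert i (d.getD i 0 + 1) else d.insert i 1)
        = fun d i => d.insert i (d.getD i 0 + 1) := by
      funext d i
      by_cases h : d.contains i
      · simp [h]
      · have h0 : d.getD i 0 = 0 := PySem.Dict.getD_of_not_contains _ _ (by simpa using h)
        simp [h, h0]
    rw [hfn]
    exact PySem.Dict.foldl_insert_getD_add_one_eq_counter (x :: t)
  have hA : val_freq_high (x :: t)
      = (match PySem.List.max? (PySem.Dict.counter (x :: t)).keys
           (fun k => (PySem.Dict.counter (x :: t)).getD k 0) with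
         | some high => high
         | none => 0) :=
    congrArg (fun c : PySem.Dict Int Int =>
      match PySem.List.max? c.keys (fun k => c.getD k 0) with
      | some high => high
      | none => 0) hctr
  rw [hA]
  simp only [PySem.Dict.keys_counter, PySem.Dict.getD_counter]
  unfold pv_mode
  -- B side: dedup the scan
  have hded := foldl_mode_dedup (fun v => (x :: t).count v) (x :: t) PySem.Set.empty
    ((x :: t).headD 0) (by intro y hy; simp [PySem.Set.empty] at hy)
  have hof : PySem.Set.update PySem.Set.empty (x :: t) = PySem.Set.ofList (x :: t) := rfl
  rw [hof] at hded
  simp only [PySem.Set.empty, List.length_nil, List.drop_zero] at hded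
  rw [hded]
  -- Set.ofList (x :: t) = x :: r
  have hcons : ∃ r, PySem.Set.ofList (x :: t) = x :: r := by
    obtain ⟨rest, hrest⟩ := prefix_set_update t ([x] : PySem.Set Int)
    exact ⟨rest, by rw [show PySem.Set.ofList (x :: t) = PySem.Set.update [x] t from rfl, ← hrest]; rfl⟩
  obtain ⟨r, hr⟩ := hcons
  rw [hr]
  -- A side: unfold max? on the cons list
  rw [max?_cons_eq_foldl (fun k => ((x :: t).count k : Int)) r x]
  simp only [List.headD_cons, List.foldl_cons, if_neg (lt_irrefl ((x :: t).count x))]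
  congr 1
  funext m y
  simp [Nat.cast_lt]

-- ---------- assembly ----------

theorem len_getD (m : List (List Int)) (i : Nat) :
    (m.map List.length).getD i 0 = (m.getD i []).length := by
  by_cases hi : i < m.length
  · rw [List.getD_eq_getElem _ _ hi, List.getD_eq_getElem _ _ (by simpa using hi),
      List.getElem_map]
  · rw [List.getD_eq_default _ _ (by simpa using not_lt.mp hi),
      List.getD_eq_default _ _ (by simpa using not_lt.mp hi)]
    rfl

theorem phase1_eq (m0 : List (List Int)) :
    (List.range m0.length).map (fun i =>
        (List.range (m0.getD i []).length).map (fun j => [(m0.getD i []).getD j 0]))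
      = pvV (m0.map List.length) [m0] := by
  apply List.ext_getElem
  · simp [pvV]
  · intro i h1 h2
    simp only [pvV, List.getElem_map, List.getElem_range]
    rw [len_getD]
    apply List.ext_getElem
    · simp
    · intro j hj1 hj2
      simp

-- ===== VERDICT (by name: the statement is the Claim_ definition above) =====
theorem mean_multi_prediction_finale_spec : Claim_equal_mean_multi_prediction_finale := by
  unfold Claim_equal_mean_multi_prediction_finale
  intro mp hdom hpre
  unfold Spec_mean_multi_prediction_finale
  obtain ⟨hne, hshape⟩ := hpre
  obtain ⟨m0, rest, rfl⟩ := List.exists_cons_of_ne_nil hne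
  have hshape' : ∀ m ∈ rest, m.map List.length = m0.map List.length := by
    intro m hm; simpa using hshape m (by simp [hm])
  simp only [mean_multi_prediction_finale, mean_multi_prediction_finale_alt, List.headD_cons]
  simp only [PySem.List.foldl_append_singleton_eq_map, List.nil_append]
  rw [phase1_eq m0]
  change List.map _ (List.foldl (fun pc n => pvStep pc ((m0 :: rest).getD n [])) _ _) = _
  rw [foldl_range'_getD (m0 :: rest) [] pvStep ((m0 :: rest).length - 1) 1
    (pvV (m0.map List.length) [m0]) (by simp)]
  rw [show (m0 :: rest).drop 1 = rest from rfl]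
  rw [pv_models (m0.map List.length) rest [m0] hshape']
  rw [show ([m0] ++ rest) = m0 :: rest from rfl]
  apply List.ext_getElem
  · simp [pvV]
  · intro i h1 h2
    simp only [pvV, List.getElem_map, List.getElem_range, List.length_map] at h1 h2 ⊢
    rw [len_getD]
    apply List.ext_getElem
    · simp
    · intro j hj1 hj2
      simp only [List.getElem_map, List.getElem_range]
      exact val_freq_high_eq_pv_mode _ (by simp)
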